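-- pv_equiv track=rewrite | github.com/Mumulhy/LeetCode | 1601-最多可达成的换楼请求数目/MaximumRequests.py | maximumRequests
-- ===== SOURCE A (Python) =====
-- from itertools import combinations
-- from typing import List
--
-- def maximumRequests(n: int, requests: List[List[int]]) -> int:
--     for i in range(len(requests), 0, -1):
--         for comb in combinations(requests, i):
--             delta = [0] * n
--             for x, y in comb:
--                 delta[x] -= 1
--                 delta[y] += 1
--             if all(x == 0 for x in delta):
--                 return i
--     return 0
-- ===== SOURCE B (Python) =====
-- def maximumRequests(n, requests):
--     m = len(requests)
--     best = 0
--     for mask in range(1 << m):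
--         delta = [0] * n
--         for j in range(m):
--             if (mask >> j) & 1:
--                 x, y = requests[j]
--                 delta[x] -= 1
--                 delta[y] += 1
--         if all(v == 0 for v in delta):
--             cnt = sum((mask >> j) & 1 for j in range(m))
--             if cnt > best:
--                 best = cnt
--     return best
-- ===== Notes on version B (the rewrite author's own statement) =====
-- stated objective: alternative
-- what changed: Replaces the size-descending itertools.combinations scan with early return by a flat enumeration of all bitmasks 0..2^m-1 that tracks the maximum popcount among balanced subsets.
import Mathlib
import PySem

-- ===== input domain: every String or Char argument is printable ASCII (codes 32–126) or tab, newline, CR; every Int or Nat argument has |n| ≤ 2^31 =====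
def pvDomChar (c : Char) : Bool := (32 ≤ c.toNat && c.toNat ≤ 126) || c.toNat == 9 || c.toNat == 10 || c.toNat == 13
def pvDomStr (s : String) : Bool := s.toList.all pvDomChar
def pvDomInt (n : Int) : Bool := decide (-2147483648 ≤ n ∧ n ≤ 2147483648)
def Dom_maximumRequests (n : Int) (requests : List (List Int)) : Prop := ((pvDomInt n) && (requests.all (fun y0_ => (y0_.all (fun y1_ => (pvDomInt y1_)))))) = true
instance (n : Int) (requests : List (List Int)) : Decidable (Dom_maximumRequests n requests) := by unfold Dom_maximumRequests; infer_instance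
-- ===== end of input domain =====

-- B replaces A's size-descending itertools.combinations scan (early return at the first
-- balanced size) by a flat bitmask enumeration that keeps the maximum balanced popcount;
-- objective: alternative decomposition (same exponential cost, no speed claim).

-- ===== PORT A =====

-- Python `delta[i] += v`: negative index wraps, in-range guaranteed by Pre_ (out of range
-- Python raises IndexError; the port leaves delta unchanged there, outside Pre_).
def pyBump (d : List Int) (i v : Int) : List Int :=
  let j : Int := if i < 0 then i + (d.length : Int) else i
  if 0 ≤ j ∧ j < (d.length : Int) then d.set j.toNat (d.getD j.toNat 0 + v) else d

-- one iteration of `for x, y in comb: delta[x] -= 1; delta[y] += 1`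
-- (a request that is not a 2-element list raises ValueError in Python; outside Pre_)
def applyReq (d : List Int) (r : List Int) : List Int :=
  match r with
  | [x, y] => pyBump (pyBump d x (-1)) y 1
  | _ => d

-- `delta = [0]*n; for x,y in comb: …; all(x == 0 for x in delta)`
def balancedA (m : Nat) (comb : List (List Int)) : Bool :=
  (comb.foldl applyReq (List.replicate m 0)).all (fun v => v == 0)

-- `for i in range(len(requests), 0, -1): for comb in combinations(requests, i): … return i`
-- itertools.combinations(requests, i) is ported as List.sublistsLen i requests (the library
-- call: same collection of size-i sub-sequences; only `.any` of it is used, so order is moot).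
def loopA (m : Nat) (requests : List (List Int)) : Nat → Int
  | 0 => 0
  | k + 1 =>
    if (List.sublistsLen (k + 1) requests).any (balancedA m) then ((k + 1 : Nat) : Int)
    else loopA m requests k

def maximumRequests (n : Int) (requests : List (List Int)) : Int :=
  loopA n.toNat requests requests.length

-- ===== PORT B =====

-- transliteration of Source B: for mask in range(1 << m): build delta over set bits,
-- if balanced take the popcount (sum of bits) and keep the maximum.
def maximumRequests_alt (n : Int) (requests : List (List Int)) : Int :=
  let m := requests.length
  (List.range (2 ^ m)).foldl
    (fun best mask =>
      let delta := (List.range m).foldl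
        (fun d j => if (mask >>> j) % 2 == 1 then applyReq d (requests.getD j []) else d)
        (List.replicate n.toNat 0)
      if delta.all (fun v => v == 0) then
        let cnt : Int := (List.range m).foldl
          (fun c j => c + (((mask >>> j) % 2 : Nat) : Int)) 0
        if cnt > best then cnt else best
      else best)
    0

-- ===== PRECONDITION & SPEC =====
-- Pre_ excludes exactly the inputs on which the Python A raises: a request that is not a
-- 2-element list (unpacking ValueError), or an index outside [-max(n,0), max(n,0))
-- (IndexError on delta = [0]*n).  Both Pythons raise there; nothing is excluded on which
-- A returns.
def Pre_maximumRequests (n : Int) (requests : List (List Int)) : Prop :=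
  ∀ r ∈ requests, r.length = 2 ∧ ∀ i ∈ r, -(max n 0) ≤ i ∧ i < max n 0
instance (n : Int) (requests : List (List Int)) : Decidable (Pre_maximumRequests n requests) := by
  unfold Pre_maximumRequests; infer_instance

def pvWitness_maximumRequests : Int × List (List Int) := (2, [[0, 1], [1, 0]])

def Spec_maximumRequests (n : Int) (requests : List (List Int)) (out : Int) : Prop := out = maximumRequests_alt n requests
instance (n : Int) (requests : List (List Int)) (out : Int) : Decidable (Spec_maximumRequests n requests out) := by unfold Spec_maximumRequests; infer_instance

-- ===== CLAIM (what is proved, stated in full; the proofs are below) =====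
def Claim_equal_maximumRequests : Prop := ∀ (n : Int) (requests : List (List Int)), Dom_maximumRequests n requests → Pre_maximumRequests n requests → Spec_maximumRequests n requests (maximumRequests n requests)

-- ===== LEMMAS AND PROOFS =====

-- the sub-list of `l` selected by the low bits of `mask`
def pvSel (mask : Nat) : List (List Int) → List (List Int)
  | [] => []
  | x :: xs => (if mask % 2 = 1 then [x] else []) ++ pvSel (mask / 2) xs

-- generic "fold keeping the max of val over elements satisfying cond" shape
def pvFmax {α : Type} (cond : α → Bool) (val : α → Int) (b : Int) (L : List α) : Int :=
  L.foldl (fun b x => if cond x then (if val x > b then val x else b) else b) b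

theorem pvFmax_ge_init {α : Type} (cond : α → Bool) (val : α → Int) (L : List α) :
    ∀ b : Int, b ≤ pvFmax cond val b L := by
  induction L with
  | nil => intro b; exact le_refl b
  | cons a L ih =>
    intro b
    have h1 : b ≤ (if cond a then (if val a > b then val a else b) else b) := by
      split_ifs <;> omega
    have h2 := ih (if cond a then (if val a > b then val a else b) else b)
    simpa [pvFmax, List.foldl_cons] using le_trans h1 h2

theorem pvFmax_ge_mem {α : Type} (cond : α → Bool) (val : α → Int) (L : List α) {x : α} :
    ∀ b : Int, x ∈ L → cond x = true → val x ≤ pvFmax cond val b L := by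
  induction L with
  | nil => intro b hx; cases hx
  | cons a L ih =>
    intro b hx hc
    rcases List.mem_cons.mp hx with h | h
    · subst h
      have h1 : val x ≤ (if cond x then (if val x > b then val x else b) else b) := by
        rw [if_pos hc]
        by_cases hv : val x > b
        · rw [if_pos hv]
        · rw [if_neg hv]; omega
      have h2 := pvFmax_ge_init cond val L (if cond x then (if val x > b then val x else b) else b)
      simpa [pvFmax, List.foldl_cons] using le_trans h1 h2
    · have := ih (if cond a then (if val a > b then val a else b) else b) h hc
      simpa [pvFmax, List.foldl_cons] using this

theorem pvFmax_le {α : Type} (cond : α → Bool) (val : α → Int) (L : List α) (c : Int) :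
    ∀ b : Int, b ≤ c → (∀ x ∈ L, cond x = true → val x ≤ c) → pvFmax cond val b L ≤ c := by
  induction L with
  | nil => intro b hb _; exact hb
  | cons a L ih =>
    intro b hb hall
    have hstep : (if cond a then (if val a > b then val a else b) else b) ≤ c := by
      split_ifs with h1 h2
      · exact hall a (by simp) h1
      · exact hb
      · exact hb
    have := ih _ hstep (fun x hx hc => hall x (List.mem_cons_of_mem _ hx) hc)
    simpa [pvFmax, List.foldl_cons] using this

-- the common value both programs compute
def pvMx (m : Nat) (requests : List (List Int)) : Int :=
  pvFmax (balancedA m) (fun s => (s.length : Int)) 0 requests.sublists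

-- ---------- A-side ----------

theorem loopA_nonneg (m : Nat) (requests : List (List Int)) :
    ∀ k, 0 ≤ loopA m requests k := by
  intro k
  induction k with
  | zero => simp [loopA]
  | succ k ih =>
    simp only [loopA]
    split_ifs with h
    · positivity
    · exact ih

theorem loopA_le_Mx (m : Nat) (requests : List (List Int)) :
    ∀ k, loopA m requests k ≤ pvMx m requests := by
  intro k
  induction k with
  | zero => simpa [loopA] using pvFmax_ge_init (balancedA m) (fun s => (s.length : Int)) requests.sublists 0
  | succ k ih =>
    simp only [loopA]
    split_ifs with h
    · obtain ⟨s, hsmem, hsbal⟩ := List.any_eq_true.mp h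
      obtain ⟨hsub, hlen⟩ := List.mem_sublistsLen.mp hsmem
      have := pvFmax_ge_mem (balancedA m) (fun s => (s.length : Int)) requests.sublists 0
        (List.mem_sublists.mpr hsub) hsbal
      simpa [pvMx, hlen] using this
    · exact ih

theorem loopA_ge (m : Nat) (requests : List (List Int)) (s : List (List Int))
    (hsub : s.Sublist requests) (hbal : balancedA m s = true) :
    ∀ k, s.length ≤ k → (s.length : Int) ≤ loopA m requests k := by
  intro k
  induction k with
  | zero =>
    intro hle
    have : s.length = 0 := Nat.le_zero.mp hle
    simp [this, loopA]
  | succ k ih =>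
    intro hle
    simp only [loopA]
    split_ifs with h
    · exact_mod_cast hle
    · have hne : s.length ≠ k + 1 := by
        intro he
        exact h (List.any_eq_true.mpr ⟨s, List.mem_sublistsLen.mpr ⟨hsub, he⟩, hbal⟩)
      exact ih (by omega)

theorem A_eq_Mx (m : Nat) (requests : List (List Int)) :
    loopA m requests requests.length = pvMx m requests := by
  refine le_antisymm (loopA_le_Mx m requests _) ?_
  refine pvFmax_le _ _ _ _ 0 (loopA_nonneg m requests _) ?_
  intro s hs hbal
  exact loopA_ge m requests s (List.mem_sublists.mp hs) hbal requests.length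
    (List.Sublist.length_le (List.mem_sublists.mp hs))

-- ---------- B-side ----------

theorem pvShiftRight_succ (mask j : Nat) : mask >>> (j + 1) = (mask / 2) >>> j := by
  simp only [Nat.shiftRight_eq_div_pow, Nat.div_div_eq_div_mul]
  rw [pow_succ']

theorem pvSel_sublist (l : List (List Int)) : ∀ mask, (pvSel mask l).Sublist l := by
  induction l with
  | nil => intro mask; simp [pvSel]
  | cons x xs ih =>
    intro mask
    simp only [pvSel]
    split_ifs with h
    · simpa using List.Sublist.cons₂ x (ih (mask / 2))
    · simpa using List.Sublist.cons x (ih (mask / 2))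

theorem pvSel_surj {s l : List (List Int)} (h : s.Sublist l) :
    ∃ mask, mask < 2 ^ l.length ∧ pvSel mask l = s := by
  induction h with
  | slnil => exact ⟨0, by simp, rfl⟩
  | @cons l₁ l₂ a h ih =>
    obtain ⟨mk, hlt, he⟩ := ih
    refine ⟨2 * mk, ?_, ?_⟩
    · have : 2 ^ (l₂.length + 1) = 2 ^ l₂.length * 2 := by ring
      simp only [List.length_cons, this]; omega
    · have h1 : (2 * mk) % 2 = 0 := by omega
      have h2 : (2 * mk) / 2 = mk := by omega
      simp [pvSel, h1, h2, he]
  | @cons₂ l₁ l₂ a h ih =>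
    obtain ⟨mk, hlt, he⟩ := ih
    refine ⟨2 * mk + 1, ?_, ?_⟩
    · have : 2 ^ (l₂.length + 1) = 2 ^ l₂.length * 2 := by ring
      simp only [List.length_cons, this]; omega
    · have h1 : (2 * mk + 1) % 2 = 1 := by omega
      have h2 : (2 * mk + 1) / 2 = mk := by omega
      simp [pvSel, h1, h2, he]

-- the inner delta loop of B computes the fold over the selected sub-list
theorem B_delta (l : List (List Int)) :
    ∀ (mask : Nat) (d : List Int),
      (List.range l.length).foldl
        (fun d j => if (mask >>> j) % 2 == 1 then applyReq d (l.getD j []) else d) d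
      = (pvSel mask l).foldl applyReq d := by
  induction l with
  | nil => intro mask d; simp [pvSel]
  | cons x xs ih =>
    intro mask d
    rw [List.length_cons, List.range_succ_eq_map, List.foldl_cons, List.foldl_map]
    have hfun : (fun (d : List Int) (j : Nat) =>
        if (mask >>> (j + 1)) % 2 == 1 then applyReq d ((x :: xs).getD (j + 1) []) else d)
      = (fun (d : List Int) (j : Nat) =>
        if ((mask / 2) >>> j) % 2 == 1 then applyReq d (xs.getD j []) else d) := by
      funext d j
      rw [pvShiftRight_succ, List.getD_cons_succ]
    simp only [Nat.succ_eq_add_one, hfun]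
    rw [ih (mask / 2)]
    simp only [pvSel, Nat.shiftRight_zero, List.foldl_append]
    by_cases h : mask % 2 = 1
    · simp [h]
    · simp [h]

-- the popcount loop of B computes the length of the selected sub-list
theorem B_cnt_sum (l : List (List Int)) :
    ∀ mask : Nat,
      ((List.range l.length).map (fun j => (((mask >>> j) % 2 : Nat) : Int))).sum
      = ((pvSel mask l).length : Int) := by
  induction l with
  | nil => intro mask; simp [pvSel]
  | cons x xs ih =>
    intro mask
    rw [List.length_cons, List.range_succ_eq_map, List.map_cons, List.map_map]
    have hfun : ((fun j => (((mask >>> j) % 2 : Nat) : Int)) ∘ Nat.succ)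
        = (fun j => ((((mask / 2) >>> j) % 2 : Nat) : Int)) := by
      funext j
      simp only [Function.comp, Nat.succ_eq_add_one, pvShiftRight_succ]
    rw [hfun, List.sum_cons, ih (mask / 2)]
    simp only [Nat.shiftRight_zero, pvSel]
    by_cases h : mask % 2 = 1
    · simp [h]; ring
    · have h0 : mask % 2 = 0 := by omega
      simp [h0]

theorem B_cnt (l : List (List Int)) (mask : Nat) :
    (List.range l.length).foldl (fun c j => c + (((mask >>> j) % 2 : Nat) : Int)) 0
    = ((pvSel mask l).length : Int) := by
  rw [PySem.List.foldl_add, zero_add, B_cnt_sum]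

theorem B_eq_fmax (n : Int) (requests : List (List Int)) :
    maximumRequests_alt n requests
      = pvFmax (fun mask => balancedA n.toNat (pvSel mask requests))
          (fun mask => ((pvSel mask requests).length : Int))
          0 (List.range (2 ^ requests.length)) := by
  simp only [maximumRequests_alt, pvFmax]
  congr 1
  funext best mask
  simp only [B_delta, B_cnt, balancedA]
  rfl

theorem B_eq_Mx (n : Int) (requests : List (List Int)) :
    maximumRequests_alt n requests = pvMx n.toNat requests := by
  rw [B_eq_fmax]
  refine le_antisymm ?_ ?_
  · refine pvFmax_le _ _ _ _ 0
      (pvFmax_ge_init (balancedA n.toNat) (fun s => (s.length : Int)) requests.sublists 0) ?_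
    intro mask _ hbal
    exact pvFmax_ge_mem (balancedA n.toNat) (fun s => (s.length : Int)) requests.sublists 0
      (List.mem_sublists.mpr (pvSel_sublist requests mask)) hbal
  · refine pvFmax_le _ _ _ _ 0
      (pvFmax_ge_init _ _ (List.range (2 ^ requests.length)) 0) ?_
    intro s hs hbal
    obtain ⟨mask, hlt, he⟩ := pvSel_surj (List.mem_sublists.mp hs)
    have hc : (fun mask => balancedA n.toNat (pvSel mask requests)) mask = true := by
      simp only [he]; exact hbal
    have := pvFmax_ge_mem (fun mask => balancedA n.toNat (pvSel mask requests))
      (fun mask => ((pvSel mask requests).length : Int))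
      (List.range (2 ^ requests.length)) 0 (List.mem_range.mpr hlt) hc
    simpa [he] using this

-- ===== VERDICT (by name: the statement is the Claim_ definition above) =====
theorem maximumRequests_spec : Claim_equal_maximumRequests := by
  intro n requests _ _
  unfold Spec_maximumRequests maximumRequests
  rw [A_eq_Mx, B_eq_Mx]
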